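-- pv_equiv track=rewrite | github.com/job4sergey/algo_workout | informatics_msk_ru/ds_algs_course/searching_sorting/binary_search/binary_search_answer/task_c_saturday/MccSolution.py | solution
-- ===== SOURCE A (Python) =====
-- def check(hs, R, C, h):
--     i = 0
--     while R > 0 and i < len(hs) - C + 1:
--         if hs[i + C - 1] - hs[i] <= h:
--             R -= 1
--             i += C
--         else:
--             i += 1
--
--     return R == 0
--
-- def solution(N, R, C, hs):
--     hs.sort()
--
--     # i, j = hs[1] - hs[0] - 1, hs[-1] - hs[0] + 1
--     i, j = -1, hs[len(hs) - 1] + 1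
--
--     while i < j - 1:
--         m = i + (j - i) // 2
--         if check(hs, R, C, m):
--             j = m
--         else:
--             i = m
--
--     return j
-- ===== SOURCE B (Python) =====
-- def solution(N, R, C, hs):
--     hs.sort()
--     n = len(hs)
--     hi = hs[n - 1] + 1            # sentinel: one past the largest height = infeasible
--     prev = [0] * (n + 1)          # base row: no groups left to place -> answer 0
--     for k in range(min(R, n // C + 1)):   # more rows than can fit stays at the sentinel
--         cur = [hi] * (n + 1)
--         i = n - C
--         while i >= 0:
--             cur[i] = min(cur[i + 1], min(hi, max(hs[i + C - 1] - hs[i], prev[i + C])))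
--             i -= 1
--         prev = cur
--     return min(hi, prev[0])
-- ===== Notes on version B (the rewrite author's own statement) =====
-- stated objective: alternative
-- what changed: Replaces the binary search over answer values (each probe re-running a greedy feasibility scan) by a direct bottom-up min-max DP: dp[k][i] = minimal achievable maximum window gap when k more length-C blocks must be placed in the sorted suffix hs[i:], saturated at the sentinel hs[-1]+1; Pre_ keeps the natural domain (non-empty hs, C >= 1, R >= 0): A raises on empty hs, its values for C <= 0 come from negative-index wraparound, and for a negative group count R both A's sentinel and B's 0 are defensible answers to an unspecified corner.
-- outside the precondition, e.g. on solution(4, 1, 0, [3, 1, 2]): A returns 0, B raises ZeroDivisionError; on solution(0, 1, -1, [5]): A raises IndexError, B returns 0; on solution(0, 1, -2, [1, 2, 3, 9]): A returns 0, B returns 0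
import Mathlib
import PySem

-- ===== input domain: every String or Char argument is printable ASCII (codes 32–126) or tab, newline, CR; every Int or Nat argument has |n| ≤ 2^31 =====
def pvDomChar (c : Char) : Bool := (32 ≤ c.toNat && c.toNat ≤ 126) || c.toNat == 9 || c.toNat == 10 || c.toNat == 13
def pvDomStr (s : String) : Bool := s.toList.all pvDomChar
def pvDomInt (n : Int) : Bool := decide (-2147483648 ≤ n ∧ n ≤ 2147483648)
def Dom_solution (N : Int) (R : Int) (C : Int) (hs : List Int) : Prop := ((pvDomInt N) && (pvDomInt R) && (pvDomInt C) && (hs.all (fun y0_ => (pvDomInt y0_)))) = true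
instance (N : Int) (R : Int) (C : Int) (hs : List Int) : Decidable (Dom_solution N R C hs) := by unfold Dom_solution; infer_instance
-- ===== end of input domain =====

-- B replaces A's binary search on the answer by a bottom-up min-max DP over (rows left, position),
-- saturated at the sentinel hs[-1]+1; equivalence is about the return value (both sort hs in place).

-- ===== PORT A =====
-- while R > 0 and i < len(hs) - C + 1: ...   (fuel is a totality guard only: with C ≥ 1 the
-- loop runs at most len(hs)+1 times, so fuel len(hs)+2 makes the port exact on Pre_)
def pvCheckGo (s : List Int) (C h : Int) : Nat → Int → Int → Bool
  | 0, R, _i => R == 0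
  | fuel+1, R, i =>
    if R > 0 ∧ i < (s.length : Int) - C + 1 then
      if PySem.List.pyGetD s (i + C - 1) 0 - PySem.List.pyGetD s i 0 ≤ h then
        pvCheckGo s C h fuel (R - 1) (i + C)
      else
        pvCheckGo s C h fuel R (i + 1)
    else R == 0

def pvCheck (s : List Int) (R C h : Int) : Bool := pvCheckGo s C h (s.length + 2) R 0

-- while i < j - 1: m = i + (j - i) // 2 ...   (fuel guard: j - i shrinks every iteration)
def pvBsGo (s : List Int) (R C : Int) : Nat → Int → Int → Int
  | 0, _i, j => j
  | fuel+1, i, j =>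
    if i < j - 1 then
      let m := i + PySem.Int.floordiv (j - i) 2
      if pvCheck s R C m then pvBsGo s R C fuel i m
      else pvBsGo s R C fuel m j
    else j

def solution (N : Int) (R : Int) (C : Int) (hs : List Int) : Int :=
  let s := PySem.List.sorted hs (fun x => x) false
  let j0 := PySem.List.pyGetD s ((s.length : Int) - 1) 0 + 1
  pvBsGo s R C ((j0 + 1).toNat + 1) (-1) j0

-- ===== PORT B =====
-- inner 'while i >= 0' of Source B, filling one DP row in place (fuel guard: i decreases each step)
def pvRowGo (s : List Int) (C hi : Int) (prev : List Int) : Nat → Int → List Int → List Int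
  | 0, _i, cur => cur
  | fuel+1, i, cur =>
    if i ≥ 0 then
      pvRowGo s C hi prev fuel (i - 1) (PySem.List.pySetD cur i
        (min (PySem.List.pyGetD cur (i + 1) 0)
             (min hi (max (PySem.List.pyGetD s (i + C - 1) 0 - PySem.List.pyGetD s i 0)
                          (PySem.List.pyGetD prev (i + C) 0)))))
    else cur

def solution_alt (N : Int) (R : Int) (C : Int) (hs : List Int) : Int :=
  let s := PySem.List.sorted hs (fun x => x) false
  let n : Int := s.length
  let hi := PySem.List.pyGetD s (n - 1) 0 + 1
  let prev0 : List Int := List.replicate (n + 1).toNat 0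
  let fin := (PySem.List.pyRange 0 (min R (PySem.Int.floordiv n C + 1)) 1).foldl
    (fun prev _k =>
      pvRowGo s C hi prev ((n - C + 1).toNat + 1) (n - C) (List.replicate (n + 1).toNat hi))
    prev0
  min hi (PySem.List.pyGetD fin 0 0)

-- ===== PRECONDITION & SPEC =====
-- Pre_ keeps the natural domain: it excludes empty hs (A raises IndexError), C ≤ 0 (A's check
-- indexes hs[i+C-1] with a negative offset — IndexError on short lists, negative-index
-- wraparound otherwise; B raises ZeroDivisionError at n // C for C = 0), and R < 0 (a
-- negative number of required groups, on which A's sentinel hs[-1]+1 and B's 0 are both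
-- defensible answers to an unspecified corner).
def Pre_solution (N : Int) (R : Int) (C : Int) (hs : List Int) : Prop := hs ≠ [] ∧ 1 ≤ C ∧ 0 ≤ R
instance (N : Int) (R : Int) (C : Int) (hs : List Int) : Decidable (Pre_solution N R C hs) := by unfold Pre_solution; infer_instance
def pvWitness_solution : Int × Int × Int × List Int := (4, 2, 2, [1, 2, 3, 10])

def Spec_solution (N : Int) (R : Int) (C : Int) (hs : List Int) (out : Int) : Prop := out = solution_alt N R C hs
instance (N : Int) (R : Int) (C : Int) (hs : List Int) (out : Int) : Decidable (Spec_solution N R C hs out) := by unfold Spec_solution; infer_instance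

-- ===== CLAIM (what is proved, stated in full; the proofs are below) =====
def Claim_equal_solution : Prop := ∀ (N : Int) (R : Int) (C : Int) (hs : List Int), Dom_solution N R C hs → Pre_solution N R C hs → Spec_solution N R C hs (solution N R C hs)

-- ===== LEMMAS AND PROOFS =====

-- Reference DP (proof-side only): pvDp k i = minimal achievable maximum window gap when k
-- length-C blocks must still be placed in s[i:], saturated at hi (hi = infeasible).
def pvDp (s : List Int) (C hi : Int) : Nat → Nat → Int
  | 0, _ => 0
  | k+1, i =>
    if h : C < 1 ∨ ((s.length : Int) - C < (i : Int)) then hi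
    else
      min (pvDp s C hi (k+1) (i+1))
          (min hi (max (PySem.List.pyGetD s ((i : Int) + C - 1) 0 - PySem.List.pyGetD s (i : Int) 0)
                       (pvDp s C hi k (i + C.toNat))))
termination_by k i => (k, s.length - i)
decreasing_by
  · apply Prod.Lex.right; omega
  · apply Prod.Lex.left; omega

theorem pvDp_le_hi (s : List Int) (C hi : Int) (hhi : 0 ≤ hi) (k i : Nat) :
    pvDp s C hi k i ≤ hi := by
  cases k with
  | zero => simpa [pvDp] using hhi
  | succ k =>
    rw [pvDp]
    split
    · exact le_refl hi
    · exact le_trans (min_le_right _ _) (min_le_left _ _)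

theorem pvDp_ge (s : List Int) (C hi : Int) (k i : Nat) : min hi 0 ≤ pvDp s C hi k i := by
  induction k using Nat.strong_induction_on generalizing i with
  | _ k ihk =>
    suffices H : ∀ (d i : Nat), s.length - i ≤ d → min hi 0 ≤ pvDp s C hi k i from
      H (s.length - i) i le_rfl
    intro d
    induction d with
    | zero =>
      intro i hle
      cases k with
      | zero => simp only [pvDp]; exact min_le_right hi 0
      | succ k =>
        have h : C < 1 ∨ ((s.length : Int) - C < (i : Int)) := by omega
        rw [pvDp, dif_pos h]; exact min_le_left hi 0
    | succ d ihd =>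
      intro i hle
      cases k with
      | zero => simp only [pvDp]; exact min_le_right hi 0
      | succ k =>
        by_cases h : C < 1 ∨ ((s.length : Int) - C < (i : Int))
        · rw [pvDp, dif_pos h]; exact min_le_left hi 0
        · rw [pvDp, dif_neg h]
          refine le_min (ihd (i+1) (by omega)) (le_min (min_le_left _ _) ?_)
          exact le_trans (ihk k (by omega) (i + C.toNat)) (le_max_right _ _)

theorem pvDp_mono (s : List Int) (C hi : Int) (k i : Nat) :
    pvDp s C hi k i ≤ pvDp s C hi k (i + 1) := by
  cases k with
  | zero => simp [pvDp]
  | succ k =>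
    by_cases h : C < 1 ∨ ((s.length : Int) - C < (i : Int))
    · have h' : C < 1 ∨ ((s.length : Int) - C < ((i + 1 : Nat) : Int)) := by
        rcases h with h | h
        · exact Or.inl h
        · exact Or.inr (by push_cast; omega)
      rw [pvDp, dif_pos h, pvDp, dif_pos h']
    · rw [pvDp, dif_neg h]
      exact min_le_left _ _

-- the exchange step behind greedy correctness: taking the earliest block never hurts
theorem pvDp_exchange (s : List Int) (C hi : Int) (hC : 1 ≤ C) (hhi : 0 ≤ hi) (k i : Nat) :
    pvDp s C hi k (i + C.toNat) ≤ pvDp s C hi (k+1) (i+1) := by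
  suffices H : ∀ (d i : Nat), s.length - i ≤ d →
      pvDp s C hi k (i + C.toNat) ≤ pvDp s C hi (k+1) (i+1) from H (s.length - i) i le_rfl
  intro d
  induction d with
  | zero =>
    intro i hle
    have h : C < 1 ∨ ((s.length : Int) - C < ((i + 1 : Nat) : Int)) := by
      right; push_cast; omega
    rw [pvDp, dif_pos h]
    exact pvDp_le_hi s C hi hhi k (i + C.toNat)
  | succ d ihd =>
    intro i hle
    by_cases h : C < 1 ∨ ((s.length : Int) - C < ((i + 1 : Nat) : Int))
    · rw [pvDp, dif_pos h]
      exact pvDp_le_hi s C hi hhi k (i + C.toNat)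
    · rw [pvDp, dif_neg h]
      have hilen : i + 1 < s.length := by push_cast at h; omega
      have h1 : pvDp s C hi k (i + C.toNat) ≤ pvDp s C hi k (i + 1 + C.toNat) := by
        have := pvDp_mono s C hi k (i + C.toNat)
        have heq : i + C.toNat + 1 = i + 1 + C.toNat := by omega
        rwa [heq] at this
      refine le_min ?_ (le_min ?_ ?_)
      · exact le_trans h1 (ihd (i+1) (by omega))
      · exact pvDp_le_hi s C hi hhi k (i + C.toNat)
      · exact le_trans h1 (le_max_right _ _)

theorem pvDp_infeas (s : List Int) (C hi : Int) (hC : 1 ≤ C) (k i : Nat)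
    (hlt : (s.length : Int) - (i : Int) < ((k : Int) + 1) * C) :
    pvDp s C hi (k+1) i = hi := by
  induction k using Nat.strong_induction_on generalizing i with
  | _ k ihk =>
    suffices H : ∀ (d i : Nat), s.length - i ≤ d → (s.length : Int) - (i : Int) < ((k : Int) + 1) * C →
        pvDp s C hi (k+1) i = hi from H (s.length - i) i le_rfl hlt
    intro d
    induction d with
    | zero =>
      intro i _ _
      have h : C < 1 ∨ ((s.length : Int) - C < (i : Int)) := by omega
      rw [pvDp, dif_pos h]
    | succ d ihd =>
      intro i hle hlt'
      by_cases h : C < 1 ∨ ((s.length : Int) - C < (i : Int))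
      · rw [pvDp, dif_pos h]
      · rw [pvDp, dif_neg h]
        push_cast at h
        cases k with
        | zero => exfalso; push_cast at hlt'; omega
        | succ k =>
          have hskip : pvDp s C hi (k+1+1) (i+1) = hi :=
            ihd (i+1) (by omega) (by push_cast; push_cast at hlt'; omega)
          have htake : pvDp s C hi (k+1) (i + C.toNat) = hi :=
            ihk k (by omega) (i + C.toNat) (by
              have hr : ((k : Int) + 1 + 1) * C = ((k : Int) + 1) * C + C := by ring
              push_cast at hlt' ⊢
              omega)
          rw [hskip, htake]
          have : min hi (max (PySem.List.pyGetD s ((i : Int) + C - 1) 0 - PySem.List.pyGetD s (i : Int) 0) hi) = hi :=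
            min_eq_left (le_max_right _ _)
          rw [this, min_self]

-- A's greedy check, with enough fuel, decides "pvDp ≤ h"
theorem pvCheckGo_eq_dp (s : List Int) (C hi h : Int) (hC : 1 ≤ C) (hh0 : 0 ≤ h) (hhhi : h < hi)
    (hhi : 0 ≤ hi) :
    ∀ (fuel : Nat) (R i : Int), 0 ≤ R → 0 ≤ i → (s.length : Int) + 1 - i ≤ (fuel : Int) →
      pvCheckGo s C h fuel R i = decide (pvDp s C hi R.toNat i.toNat ≤ h) := by
  have hout : ∀ (R i : Int), 0 ≤ R → ¬ (R > 0 ∧ i < (s.length : Int) - C + 1) →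
      (R == 0) = decide (pvDp s C hi R.toNat i.toNat ≤ h) := by
    intro R i hR hcond
    by_cases hR0 : R = 0
    · subst hR0; simp [pvDp, hh0]
    · have hR1 : 1 ≤ R := by omega
      have hiC : (s.length : Int) - C + 1 ≤ i := by omega
      have hk : R.toNat = (R.toNat - 1) + 1 := by omega
      rw [hk, pvDp, dif_pos (by right; omega)]
      have : ¬ (hi ≤ h) := by omega
      simp [hR0, this]
  intro fuel
  induction fuel with
  | zero =>
    intro R i hR hi0 hfuel
    simp only [pvCheckGo]
    exact hout R i hR (by simp only [Nat.cast_zero] at hfuel; omega)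
  | succ fuel ih =>
    intro R i hR hi0 hfuel
    rw [pvCheckGo]
    by_cases hcond : R > 0 ∧ i < (s.length : Int) - C + 1
    · rw [if_pos hcond]
      obtain ⟨hR1, hiC⟩ := hcond
      have hfuel' : ((fuel : Nat) : Int) = ((fuel + 1 : Nat) : Int) - 1 := by push_cast; omega
      have hkk : R.toNat = (R.toNat - 1) + 1 := by omega
      set k : Nat := R.toNat - 1 with hkdef
      have hiT : ((i.toNat : Nat) : Int) = i := Int.toNat_of_nonneg hi0
      have hcnd : ¬ (C < 1 ∨ ((s.length : Int) - C < ((i.toNat : Nat) : Int))) := by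
        rw [hiT]; omega
      have hunf : pvDp s C hi R.toNat i.toNat =
          min (pvDp s C hi (k+1) (i.toNat+1))
              (min hi (max (PySem.List.pyGetD s ((i.toNat : Int) + C - 1) 0 - PySem.List.pyGetD s (i.toNat : Int) 0)
                           (pvDp s C hi k (i.toNat + C.toNat)))) := by
        rw [hkk, pvDp, dif_neg hcnd]
      have hgap : (PySem.List.pyGetD s ((i.toNat : Int) + C - 1) 0 - PySem.List.pyGetD s (i.toNat : Int) 0)
          = PySem.List.pyGetD s (i + C - 1) 0 - PySem.List.pyGetD s i 0 := by rw [hiT]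
      by_cases hg : PySem.List.pyGetD s (i + C - 1) 0 - PySem.List.pyGetD s i 0 ≤ h
      · rw [if_pos hg]
        rw [ih (R - 1) (i + C) (by omega) (by omega) (by push_cast at hfuel ⊢; omega)]
        have h1 : (R - 1).toNat = k := by omega
        have h2 : (i + C).toNat = i.toNat + C.toNat := by omega
        rw [h1, h2]
        congr 1
        apply propext
        constructor
        · intro hd
          rw [hunf]
          refine le_trans (min_le_right _ _) ?_
          refine le_trans (min_le_right _ _) ?_
          rw [hgap]
          exact max_le hg hd
        · intro hd
          rw [hunf] at hd
          rcases min_le_iff.mp hd with hskip | htake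
          · exact le_trans (pvDp_exchange s C hi hC hhi k i.toNat) hskip
          · rcases min_le_iff.mp htake with hh | hmax
            · omega
            · exact (max_le_iff.mp hmax).2
      · rw [if_neg hg]
        rw [ih R (i + 1) (by omega) (by omega) (by push_cast at hfuel ⊢; omega)]
        have h2 : (i + 1).toNat = i.toNat + 1 := by omega
        rw [h2]
        congr 1
        apply propext
        constructor
        · intro hd
          rw [hunf]
          rw [hkk] at hd
          exact le_trans (min_le_left _ _) hd
        · intro hd
          rw [hunf] at hd
          rcases min_le_iff.mp hd with hskip | htake
          · rw [hkk]; exact hskip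
          · rcases min_le_iff.mp htake with hh | hmax
            · omega
            · exfalso; rw [hgap] at hmax; exact hg (max_le_iff.mp hmax).1
    · rw [if_neg hcond]
      exact hout R i hR hcond

-- binary search drives (i, j) to tgt under the bracketing hypotheses
theorem pvBsGo_eq (s : List Int) (R C hi tgt : Int)
    (hP : ∀ m : Int, 0 ≤ m → m < hi → (pvCheck s R C m = true ↔ tgt ≤ m)) :
    ∀ (fuel : Nat) (i j : Int), -1 ≤ i → i < j → j ≤ hi → i < tgt → tgt ≤ j →
      j - i ≤ (fuel : Int) → pvBsGo s R C fuel i j = tgt := by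
  intro fuel
  induction fuel with
  | zero => intro i j h1 h2 h3 h4 h5 h6; exfalso; omega
  | succ fuel ih =>
    intro i j h1 h2 h3 h4 h5 h6
    rw [pvBsGo]
    by_cases hij : i < j - 1
    · rw [if_pos hij]
      show (if pvCheck s R C (i + PySem.Int.floordiv (j - i) 2) = true
            then pvBsGo s R C fuel i (i + PySem.Int.floordiv (j - i) 2)
            else pvBsGo s R C fuel (i + PySem.Int.floordiv (j - i) 2) j) = tgt
      have hfd : PySem.Int.floordiv (j - i) 2 = (j - i) / 2 :=
        PySem.Int.floordiv_eq_ediv_of_pos (by omega)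
      set m := i + PySem.Int.floordiv (j - i) 2 with hm
      have hmb : i + 1 ≤ m ∧ m ≤ j - 1 := by rw [hm, hfd]; omega
      have hm0 : 0 ≤ m := by omega
      have hmhi : m < hi := by omega
      by_cases htm : tgt ≤ m
      · rw [if_pos ((hP m hm0 hmhi).mpr htm)]
        exact ih i m (by omega) (by omega) (by omega) (by omega) htm (by push_cast at h6 ⊢; omega)
      · have : pvCheck s R C m = false := by
          cases hcv : pvCheck s R C m
          · rfl
          · exact absurd ((hP m hm0 hmhi).mp hcv) htm
        rw [this]
        simp only [Bool.false_eq_true, if_false]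
        exact ih m j (by omega) (by omega) h3 (by omega) h5 (by push_cast at h6 ⊢; omega)
    · rw [if_neg hij]
      omega

theorem pvGetD_set (l : List Int) (a : Nat) (v : Int) (j : Nat) (ha : a < l.length) :
    (l.set a v).getD j 0 = if j = a then v else l.getD j 0 := by
  by_cases hj : j = a
  · subst hj
    rw [if_pos rfl]
    simp [List.getD_eq_getElem?_getD, ha]
  · rw [if_neg hj]
    simp only [List.getD_eq_getElem?_getD, List.getElem?_set]
    rw [if_neg (by omega)]

theorem pvSetD_eq_set (l : List Int) (i v : Int) (h0 : 0 ≤ i) (hl : i.toNat < l.length) :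
    PySem.List.pySetD l i v = l.set i.toNat v := by
  have hiT : i = ((i.toNat : Nat) : Int) := (Int.toNat_of_nonneg h0).symm
  have h := PySem.List.pySet?_natCast (n := i.toNat) (xs := l) (v := v) hl
  conv_lhs => rw [hiT]
  unfold PySem.List.pySetD
  rw [h]
  rfl

theorem pvGetD_cast (l : List Int) (i : Int) (h0 : 0 ≤ i) :
    PySem.List.pyGetD l i 0 = l.getD i.toNat 0 := by
  have hiT : i = ((i.toNat : Nat) : Int) := (Int.toNat_of_nonneg h0).symm
  conv_lhs => rw [hiT]
  rw [PySem.List.pyGetD_natCast]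

-- one pass of Source B's inner loop computes one DP row
theorem pvRow_eq (s : List Int) (C hi : Int) (hC : 1 ≤ C) (k : Nat) (prev : List Int)
    (_hplen : prev.length = s.length + 1)
    (hprev : ∀ j : Nat, j ≤ s.length → prev.getD j 0 = pvDp s C hi k j) :
    ∀ (fuel : Nat) (i : Int) (cur : List Int), cur.length = s.length + 1 →
      i + 1 ≤ (fuel : Int) → i ≤ (s.length : Int) - C →
      (∀ j : Nat, j ≤ s.length → i < (j : Int) → cur.getD j 0 = pvDp s C hi (k+1) j) →
      ((pvRowGo s C hi prev fuel i cur).length = s.length + 1 ∧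
       ∀ j : Nat, j ≤ s.length → (pvRowGo s C hi prev fuel i cur).getD j 0 = pvDp s C hi (k+1) j) := by
  intro fuel
  induction fuel with
  | zero =>
    intro i cur hclen hfuel hiC hcur
    exact ⟨hclen, fun j hj => hcur j hj (by simp only [Nat.cast_zero] at hfuel; omega)⟩
  | succ fuel ih =>
    intro i cur hclen hfuel hiC hcur
    rw [pvRowGo]
    by_cases hi0 : i ≥ 0
    · rw [if_pos hi0]
      have hitn : i.toNat < cur.length := by omega
      have hiT : ((i.toNat : Nat) : Int) = i := Int.toNat_of_nonneg hi0
      -- the value written at position i is the DP value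
      have hval : min (PySem.List.pyGetD cur (i + 1) 0)
             (min hi (max (PySem.List.pyGetD s (i + C - 1) 0 - PySem.List.pyGetD s i 0)
                          (PySem.List.pyGetD prev (i + C) 0)))
          = pvDp s C hi (k+1) i.toNat := by
        have h1 : PySem.List.pyGetD cur (i + 1) 0 = pvDp s C hi (k+1) (i.toNat + 1) := by
          rw [pvGetD_cast cur (i+1) (by omega)]
          have : (i+1).toNat = i.toNat + 1 := by omega
          rw [this]
          exact hcur (i.toNat + 1) (by omega) (by push_cast; omega)
        have h2 : PySem.List.pyGetD prev (i + C) 0 = pvDp s C hi k (i.toNat + C.toNat) := by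
          rw [pvGetD_cast prev (i+C) (by omega)]
          have : (i+C).toNat = i.toNat + C.toNat := by omega
          rw [this]
          exact hprev (i.toNat + C.toNat) (by omega)
        rw [h1, h2]
        conv_rhs => rw [pvDp]
        rw [dif_neg (by rw [hiT]; omega), hiT]
      rw [hval]
      have hset : PySem.List.pySetD cur i (pvDp s C hi (k+1) i.toNat)
          = cur.set i.toNat (pvDp s C hi (k+1) i.toNat) := pvSetD_eq_set cur i _ hi0 hitn
      rw [hset]
      apply ih (i-1) _ (by rw [List.length_set]; exact hclen) (by push_cast at hfuel ⊢; omega) (by omega)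
      intro j hj hij
      rw [pvGetD_set cur i.toNat _ j hitn]
      by_cases hji : j = i.toNat
      · rw [if_pos hji, hji]
      · rw [if_neg hji]
        exact hcur j hj (by omega)
    · rw [if_neg hi0]
      exact ⟨hclen, fun j hj => hcur j hj (by omega)⟩

-- Source B's outer loop: each iteration advances the row index by one
theorem pvFold_eq (s : List Int) (C hi : Int) (hC : 1 ≤ C) :
    ∀ (l : List Int) (k : Nat) (prev : List Int), prev.length = s.length + 1 →
      (∀ j : Nat, j ≤ s.length → prev.getD j 0 = pvDp s C hi k j) →
      ((l.foldl (fun prev _k =>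
          pvRowGo s C hi prev (((s.length : Int) - C + 1).toNat + 1) ((s.length : Int) - C)
            (List.replicate (((s.length : Int)) + 1).toNat hi)) prev).length = s.length + 1 ∧
       ∀ j : Nat, j ≤ s.length →
        (l.foldl (fun prev _k =>
          pvRowGo s C hi prev (((s.length : Int) - C + 1).toNat + 1) ((s.length : Int) - C)
            (List.replicate (((s.length : Int)) + 1).toNat hi)) prev).getD j 0
          = pvDp s C hi (k + l.length) j) := by
  intro l
  induction l with
  | nil => intro k prev h1 h2; simpa using ⟨h1, h2⟩
  | cons a l ihl =>
    intro k prev h1 h2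
    rw [List.foldl_cons]
    have hrep : (List.replicate (((s.length : Int)) + 1).toNat hi).length = s.length + 1 := by
      rw [List.length_replicate]; omega
    have hrow := pvRow_eq s C hi hC k prev h1 h2 (((s.length : Int) - C + 1).toNat + 1)
      ((s.length : Int) - C) (List.replicate (((s.length : Int)) + 1).toNat hi) hrep
      (by have := Int.self_le_toNat ((s.length : Int) - C + 1); push_cast; omega)
      (by omega)
      (by
        intro j hj hij
        rw [List.getD_eq_getElem?_getD, List.getElem?_replicate]
        rw [if_pos (by omega)]
        cases k with
        | zero => rw [pvDp, dif_pos (by omega)]; rfl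
        | succ k => rw [pvDp, dif_pos (by omega)]; rfl)
    have := ihl (k+1) _ hrow.1 hrow.2
    refine ⟨this.1, fun j hj => ?_⟩
    rw [this.2 j hj]
    have : k + 1 + l.length = k + (a :: l).length := by simp; omega
    rw [this]

-- more rows than can possibly fit is already infeasible: the cap in Source B is harmless
theorem pvCap (s : List Int) (C hi : Int) (hC : 1 ≤ C) (R : Int) (hR : 0 ≤ R) :
    min hi (pvDp s C hi (min R (PySem.Int.floordiv (s.length : Int) C + 1)).toNat 0)
      = min hi (pvDp s C hi R.toNat 0) := by
  have hq : PySem.Int.floordiv (s.length : Int) C = (s.length : Int) / C :=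
    PySem.Int.floordiv_eq_ediv_of_pos (by omega)
  set q := PySem.Int.floordiv (s.length : Int) C with hqd
  have hq0 : 0 ≤ q := by rw [hq]; exact Int.ediv_nonneg (by positivity) (by omega)
  by_cases hle : R ≤ q + 1
  · rw [min_eq_left hle]
  · push_neg at hle
    have hlen : (s.length : Int) < (q + 1) * C := by
      rw [hq]; exact Int.lt_ediv_add_one_mul_self _ (by omega)
    have hq1 : (q + 1).toNat = q.toNat + 1 := by omega
    have hdp1 : pvDp s C hi (q.toNat + 1) 0 = hi :=
      pvDp_infeas s C hi hC q.toNat 0 (by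
        push_cast
        have hqq : ((q.toNat : Nat) : Int) = q := by omega
        rw [hqq]
        omega)
    have hR1 : R.toNat = (R.toNat - 1) + 1 := by omega
    have hdp2 : pvDp s C hi ((R.toNat - 1) + 1) 0 = hi := by
      apply pvDp_infeas s C hi hC (R.toNat - 1) 0
      have hcast : ((R.toNat - 1 : Nat) : Int) + 1 = R := by omega
      rw [hcast]
      calc (s.length : Int) - 0 < (q + 1) * C := by omega
        _ ≤ R * C := by
            apply mul_le_mul_of_nonneg_right (by omega) (by omega)
    rw [show min R (q + 1) = q + 1 from min_eq_right (by omega), hq1, hdp1, hR1, hdp2]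

-- ===== VERDICT (by name: the statement is the Claim_ definition above) =====
theorem solution_spec : Claim_equal_solution := by
  intro N R C hs _hDom hPre
  obtain ⟨hne, hC, hR⟩ := hPre
  unfold Spec_solution
  simp only [solution, solution_alt]
  set s := PySem.List.sorted hs (fun x => x) false with hsdef
  set hi := PySem.List.pyGetD s ((s.length : Int) - 1) 0 + 1 with hhidef
  have hfuel : hi + 1 ≤ (((hi + 1).toNat + 1 : Nat) : Int) := by
    have := Int.self_le_toNat (hi + 1); push_cast; omega
  -- rewrite B's foldl result through the DP
  have hfold := pvFold_eq s C hi hC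
    (PySem.List.pyRange 0 (min R (PySem.Int.floordiv (s.length : Int) C + 1)) 1) 0
    (List.replicate (((s.length : Int)) + 1).toNat 0)
    (by rw [List.length_replicate]; omega)
    (by
      intro j hj
      rw [List.getD_eq_getElem?_getD, List.getElem?_replicate, if_pos (by omega)]
      rw [pvDp]
      rfl)
  have hlenr : (PySem.List.pyRange 0 (min R (PySem.Int.floordiv (s.length : Int) C + 1)) 1).length
      = (min R (PySem.Int.floordiv (s.length : Int) C + 1)).toNat := by
    rw [PySem.List.length_pyRange_one]
    congr 1
    omega
  have hB : PySem.List.pyGetD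
      ((PySem.List.pyRange 0 (min R (PySem.Int.floordiv (s.length : Int) C + 1)) 1).foldl
        (fun prev _k =>
          pvRowGo s C hi prev (((s.length : Int) - C + 1).toNat + 1) ((s.length : Int) - C)
            (List.replicate (((s.length : Int)) + 1).toNat hi))
        (List.replicate (((s.length : Int)) + 1).toNat 0)) 0 0
      = pvDp s C hi (min R (PySem.Int.floordiv (s.length : Int) C + 1)).toNat 0 := by
    rw [PySem.List.pyGetD_zero, hfold.2 0 (by omega), hlenr, Nat.zero_add]
  rw [hB, pvCap s C hi hC R hR]
  have hdpge := pvDp_ge s C hi R.toNat 0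
  by_cases hpos : 0 < hi
  · have hdp0 : 0 ≤ pvDp s C hi R.toNat 0 := by omega
    apply pvBsGo_eq s R C hi (min hi (pvDp s C hi R.toNat 0))
    · intro m hm0 hmhi
      unfold pvCheck
      rw [pvCheckGo_eq_dp s C hi m hC hm0 hmhi (by omega) (s.length + 2) R 0 hR (by omega)
        (by push_cast; omega)]
      constructor
      · intro hd
        exact le_trans (min_le_right _ _) (of_decide_eq_true hd)
      · intro hd
        apply decide_eq_true
        rcases min_le_iff.mp hd with h' | h'
        · omega
        · exact h'
    all_goals omega
  · have hA : pvBsGo s R C ((hi + 1).toNat + 1) (-1) hi = hi := by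
      cases hfe : (hi + 1).toNat + 1 with
      | zero => omega
      | succ fuel => rw [pvBsGo, if_neg (by omega)]
    rw [hA]
    omega
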